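-- pv_equiv track=rewrite | github.com/okurashoichi/serena-vbs | src/solidlsp/language_servers/vbscript_lsp/reference_tracker.py | _find_comment_start
-- ===== SOURCE A (Python) =====
-- def _find_comment_start(line: str) -> int | None:
--     """Find the position where a comment starts in a line.
--
--     VBScript comments start with ' (single quote) or REM keyword.
--     This method must handle ' inside string literals.
--
--     Args:
--         line: Line content
--
--     Returns:
--         Position of comment start, or None if no comment
--     """
--     in_string = False
--     for i, char in enumerate(line):
--         if char == '"':
--             in_string = not in_string
--         elif char == "'" and not in_string:
--             return i
--         elif not in_string and i + 3 <= len(line):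
--             # Check for REM keyword (case-insensitive)
--             word_start = i == 0 or not line[i - 1].isalnum()
--             if word_start and line[i : i + 3].upper() == "REM":
--                 word_end = i + 3 >= len(line) or not line[i + 3].isalnum()
--                 if word_end:
--                     return i
--
--     return None
-- ===== SOURCE B (Python) =====
-- def _find_comment_start(line: str) -> int | None:
--     """Segment-based re-implementation: split on '"'; even-indexed segments are
--     outside string literals; search each outside segment for the earliest ' or
--     word-bounded REM, tracking the global offset."""
--     offset = 0
--     for k, part in enumerate(line.split('"')):
--         if k % 2 == 0:
--             hit = _search_segment(part)
--             if hit is not None: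
--                 return offset + hit
--         offset += len(part) + 1
--     return None
--
--
-- def _search_segment(part: str) -> int | None:
--     """Earliest comment marker inside a quote-free segment (local index)."""
--     for j, ch in enumerate(part):
--         if ch == "'":
--             return j
--         if (
--             j + 3 <= len(part)
--             and (j == 0 or not part[j - 1].isalnum())
--             and part[j : j + 3].upper() == "REM"
--             and (j + 3 == len(part) or not part[j + 3].isalnum())
--         ):
--             return j
--     return None
-- ===== Notes on version B (the rewrite author's own statement) =====
-- stated objective: alternative
-- what changed: Replaced the stateful in_string character scan by a split-on-double-quote decomposition: even-indexed segments (outside string literals) are searched segment-locally for the earliest single quote or word-bounded REM while a running global offset is maintained; odd segments are only counted into the offset.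
import Mathlib
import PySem

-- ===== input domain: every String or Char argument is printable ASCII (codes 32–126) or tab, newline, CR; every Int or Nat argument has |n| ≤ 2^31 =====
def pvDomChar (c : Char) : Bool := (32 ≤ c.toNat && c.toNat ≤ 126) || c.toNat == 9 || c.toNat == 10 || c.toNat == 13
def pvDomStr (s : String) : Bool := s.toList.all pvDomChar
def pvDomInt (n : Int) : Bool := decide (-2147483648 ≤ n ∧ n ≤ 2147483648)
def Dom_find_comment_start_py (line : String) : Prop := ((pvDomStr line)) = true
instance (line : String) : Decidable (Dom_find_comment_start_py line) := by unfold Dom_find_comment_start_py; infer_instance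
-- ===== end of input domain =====

-- B replaces A's stateful in_string scan by a split-on-'"' decomposition (segment-local search
-- plus a running global offset); same O(n) cost, proved to return the same Option Int on every input.


-- ===== PORT A =====
-- literal transliteration of A's single pass: for i, char in enumerate(line) with an in_string
-- flag; the global-index lookups line[i-1], line[i:i+3], line[i+3] are guarded in-range in A
def pvALoop (s : List Char) : List (Int × Char) → Bool → Option Int
  | [], _ => none
  | (i, ch) :: rest, inStr =>
    if ch = '"' then pvALoop s rest (!inStr)
    else if ch = '\'' && !inStr then some i
    else if !inStr && decide (i + 3 ≤ (s.length : Int)) then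
      let wordStart := (i == 0) || !(PySem.Chars.isalnum (PySem.List.pyGetD s (i - 1) ' '))
      if wordStart && (PySem.Chars.upper (PySem.List.slice s (some i) (some (i + 3))) == ['R', 'E', 'M']) then
        let wordEnd := decide ((s.length : Int) ≤ i + 3) || !(PySem.Chars.isalnum (PySem.List.pyGetD s (i + 3) ' '))
        if wordEnd then some i else pvALoop s rest inStr
      else pvALoop s rest inStr
    else pvALoop s rest inStr

def find_comment_start_py (line : String) : Option Int :=
  pvALoop line.toList (PySem.List.enumerate line.toList) false

-- ===== PORT B =====
-- transliteration of Source B: _search_segment scans one quote-free segment (local indices);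
-- the walk over line.split('"') keeps the parity k and the running global offset
def pvSegSearch (part : List Char) : List (Int × Char) → Option Int
  | [] => none
  | (j, ch) :: rest =>
    if ch = '\'' then some j
    else if decide (j + 3 ≤ (part.length : Int)) &&
            ((j == 0) || !(PySem.Chars.isalnum (PySem.List.pyGetD part (j - 1) ' '))) &&
            (PySem.Chars.upper (PySem.List.slice part (some j) (some (j + 3))) == ['R', 'E', 'M']) &&
            ((j + 3 == (part.length : Int)) || !(PySem.Chars.isalnum (PySem.List.pyGetD part (j + 3) ' ')))
      then some j
    else pvSegSearch part rest

def pvBWalk : List (List Char) → Int → Int → Option Int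
  | [], _, _ => none
  | part :: rest, k, offset =>
    if PySem.Int.mod k 2 = 0 then
      match pvSegSearch part (PySem.List.enumerate part) with
      | some h => some (offset + h)
      | none => pvBWalk rest (k + 1) (offset + (part.length : Int) + 1)
    else pvBWalk rest (k + 1) (offset + (part.length : Int) + 1)

def find_comment_start_py_alt (line : String) : Option Int :=
  pvBWalk (line.toList.splitOn '"') 0 0

-- ===== PRECONDITION & SPEC =====
def Spec_find_comment_start_py (line : String) (out : Option Int) : Prop := out = find_comment_start_py_alt line
instance (line : String) (out : Option Int) : Decidable (Spec_find_comment_start_py line out) := by unfold Spec_find_comment_start_py; infer_instance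

-- ===== CLAIM (what is proved, stated in full; the proofs are below) =====
def Claim_equal_find_comment_start_py : Prop := ∀ (line : String), Dom_find_comment_start_py line → Spec_find_comment_start_py line (find_comment_start_py line)

-- ===== LEMMAS AND PROOFS =====

-- whether the character before the current suffix is alphanumeric (false at line start)
def pvLastAl (pre : List Char) : Bool :=
  match pre.getLast? with
  | none => false
  | some d => PySem.Chars.isalnum d

-- suffix-local form of A's combined REM test at the head of l, given pvLastAl of the prefix
def pvRemHit (pa : Bool) (l : List Char) : Bool :=
  decide (3 ≤ l.length) && !pa && (PySem.Chars.upper (l.take 3) == ['R', 'E', 'M']) &&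
  (decide (l.length ≤ 3) || !(PySem.Chars.isalnum (l.getD 3 ' ')))

-- clean structural restatement of A's scan (suffix + index + prev-alnum + in_string)
def pvAClean : List Char → Int → Bool → Bool → Option Int
  | [], _, _, _ => none
  | c :: t, i, pa, inStr =>
    if c = '"' then pvAClean t (i + 1) false (!inStr)
    else if inStr then pvAClean t (i + 1) (PySem.Chars.isalnum c) true
    else if c = '\'' then some i
    else if pvRemHit pa (c :: t) then some i
    else pvAClean t (i + 1) (PySem.Chars.isalnum c) false

-- clean global-index segment search (g = global index of the head of the suffix)
def pvSegClean : List Char → Int → Bool → Option Int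
  | [], _, _ => none
  | c :: t, g, pa =>
    if c = '\'' then some g
    else if pvRemHit pa (c :: t) then some g
    else pvSegClean t (g + 1) (PySem.Chars.isalnum c)

-- clean form of B's walk over the segments (the Bool = "currently inside a string literal")
def pvW : Bool → Bool → List (List Char) → Int → Option Int
  | _, _, [], _ => none
  | false, pa, p :: rest, off =>
    match pvSegClean p off pa with
    | some i => some i
    | none => pvW true false rest (off + (p.length : Int) + 1)
  | true, _, p :: rest, off => pvW false false rest (off + (p.length : Int) + 1)

lemma pvLastAl_append (pre : List Char) (c : Char) :
    pvLastAl (pre ++ [c]) = PySem.Chars.isalnum c := by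
  simp [pvLastAl]

-- A's global-index REM test at position |pre| equals the suffix-local pvRemHit
lemma pvCond_global (pre t : List Char) (c : Char) :
    (decide ((pre.length : Int) + 3 ≤ ((pre ++ c :: t).length : Int)) &&
     (((pre.length : Int) == 0) || !(PySem.Chars.isalnum (PySem.List.pyGetD (pre ++ c :: t) ((pre.length : Int) - 1) ' '))) &&
     (PySem.Chars.upper (PySem.List.slice (pre ++ c :: t) (some (pre.length : Int)) (some ((pre.length : Int) + 3))) == ['R', 'E', 'M']) &&
     (decide (((pre ++ c :: t).length : Int) ≤ (pre.length : Int) + 3) ||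
       !(PySem.Chars.isalnum (PySem.List.pyGetD (pre ++ c :: t) ((pre.length : Int) + 3) ' ')))) =
    pvRemHit (pvLastAl pre) (c :: t) := by
  have hslice : PySem.List.slice (pre ++ c :: t) (some (pre.length : Int)) (some ((pre.length : Int) + 3)) = (c :: t).take 3 := by
    have := PySem.List.slice_natCast_add (pre ++ c :: t) pre.length 3
    simpa [List.drop_left] using this
  have hget3 : PySem.List.pyGetD (pre ++ c :: t) ((pre.length : Int) + 3) ' ' = (c :: t).getD 3 ' ' := by
    have : ((pre.length : Int) + 3) = ((pre.length + 3 : Nat) : Int) := by push_cast; ring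
    rw [this, PySem.List.pyGetD_natCast]
    simp [List.getD, List.getElem?_append_right]
  have hlen1 : (decide ((pre.length : Int) + 3 ≤ ((pre ++ c :: t).length : Int))) = decide (3 ≤ (c :: t).length) := by
    simp; omega
  have hlen2 : (decide (((pre ++ c :: t).length : Int) ≤ (pre.length : Int) + 3)) = decide ((c :: t).length ≤ 3) := by
    simp
  have hprev : (((pre.length : Int) == 0) || !(PySem.Chars.isalnum (PySem.List.pyGetD (pre ++ c :: t) ((pre.length : Int) - 1) ' '))) = !(pvLastAl pre) := by
    rcases List.eq_nil_or_concat' pre with rfl | ⟨q, d, rfl⟩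
    · simp [pvLastAl]
    · have h1 : ((q ++ [d]).length : Int) - 1 = ((q.length : Nat) : Int) := by simp
      rw [h1, PySem.List.pyGetD_natCast]
      simp [pvLastAl, List.getD]
      exact fun h => absurd h (by omega)
  rw [hslice, hget3, hlen1, hlen2, hprev, pvRemHit]

-- A's port, started at any split point pre ++ t, equals the clean scan of the suffix t
lemma pvALoop_bridge (t : List Char) : ∀ (pre : List Char) (inStr : Bool),
    pvALoop (pre ++ t) (PySem.List.enumerate t (pre.length : Int)) inStr =
    pvAClean t (pre.length : Int) (pvLastAl pre) inStr := by
  induction t with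
  | nil => intro pre inStr; simp [PySem.List.enumerate_nil, pvALoop, pvAClean]
  | cons c t' ih =>
    intro pre inStr
    rw [PySem.List.enumerate_cons]
    have hpre : pre ++ c :: t' = (pre ++ [c]) ++ t' := by simp
    have hlen : ((pre ++ [c]).length : Int) = (pre.length : Int) + 1 := by simp
    have ihc := fun b => ih (pre ++ [c]) b
    rw [hlen, pvLastAl_append] at ihc
    have ihc' : ∀ b, pvAClean t' ((pre.length : Int) + 1) (PySem.Chars.isalnum c) b =
        pvALoop (pre ++ c :: t') (PySem.List.enumerate t' ((pre.length : Int) + 1)) b := by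
      intro b; rw [hpre]; exact (ihc b).symm
    have hcond := pvCond_global pre t' c
    by_cases hq : c = '"'
    · subst hq
      have hquote : PySem.Chars.isalnum '"' = false := by decide
      rw [hquote] at ihc
      rw [pvALoop, pvAClean, if_pos rfl, if_pos rfl, hpre]
      exact ihc (!inStr)
    · by_cases hs : inStr
      · subst hs
        rw [pvALoop, pvAClean, if_neg hq, if_neg hq]
        simp only [if_true]
        rw [hpre, ← ihc true]
        simp
      · simp only [Bool.not_eq_true] at hs; subst hs
        by_cases hap : c = '\''
        · subst hap
          rw [pvALoop, pvAClean, if_neg hq, if_neg hq]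
          simp
        · rw [pvALoop, pvAClean, if_neg hq, if_neg hq]
          simp only [Bool.not_true, Bool.and_false]
          simp only [if_neg hap]
          rw [← hcond, ihc' false]
          simp only [Bool.not_false, Bool.true_and]
          generalize pvALoop (pre ++ c :: t') (PySem.List.enumerate t' ((pre.length : Int) + 1)) false = r
          generalize (decide ((pre.length : Int) + 3 ≤ (((pre ++ c :: t').length : Int)))) = b1
          generalize (((pre.length : Int) == 0) || !(PySem.Chars.isalnum (PySem.List.pyGetD (pre ++ c :: t') ((pre.length : Int) - 1) ' '))) = b2
          generalize (PySem.Chars.upper (PySem.List.slice (pre ++ c :: t') (some (pre.length : Int)) (some ((pre.length : Int) + 3))) == ['R', 'E', 'M']) = b3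
          generalize (decide (((pre ++ c :: t').length : Int) ≤ (pre.length : Int) + 3) || !(PySem.Chars.isalnum (PySem.List.pyGetD (pre ++ c :: t') ((pre.length : Int) + 3) ' '))) = b4
          cases b1 <;> cases b2 <;> cases b3 <;> cases b4 <;> simp [hap]

-- B's segment search, started at any split point of the part, equals the clean global-index search
lemma pvSeg_bridge (t : List Char) : ∀ (pre : List Char) (off : Int),
    (pvSegSearch (pre ++ t) (PySem.List.enumerate t (pre.length : Int))).map (off + ·) =
    pvSegClean t (off + (pre.length : Int)) (pvLastAl pre) := by
  induction t with
  | nil => intro pre off; simp [PySem.List.enumerate_nil, pvSegSearch, pvSegClean]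
  | cons c t' ih =>
    intro pre off
    rw [PySem.List.enumerate_cons]
    have hpre : pre ++ c :: t' = (pre ++ [c]) ++ t' := by simp
    have hlen : ((pre ++ [c]).length : Int) = (pre.length : Int) + 1 := by simp
    have ihc := ih (pre ++ [c]) off
    rw [hlen, pvLastAl_append] at ihc
    have ihc' : pvSegClean t' (off + ((pre.length : Int) + 1)) (PySem.Chars.isalnum c) =
        (pvSegSearch (pre ++ c :: t') (PySem.List.enumerate t' ((pre.length : Int) + 1))).map (off + ·) := by
      rw [hpre]; exact ihc.symm
    have h4 : ((pre.length : Int) + 3 == ((pre ++ c :: t').length : Int)) =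
        decide (((pre ++ c :: t').length : Int) ≤ (pre.length : Int) + 3) ∨
        (decide ((pre.length : Int) + 3 ≤ ((pre ++ c :: t').length : Int)) = false) := by
      by_cases h1 : (pre.length : Int) + 3 ≤ ((pre ++ c :: t').length : Int)
      · left
        by_cases h2 : ((pre ++ c :: t').length : Int) ≤ (pre.length : Int) + 3
        · have heq : (pre.length : Int) + 3 = ((pre ++ c :: t').length : Int) := by
            simp at h1 h2 ⊢; omega
          simp [heq]
        · have h3 : ((3 : Int)) ≠ (t'.length : Int) + 1 := by simp at h2; omega
          have h5 : ¬ (t'.length < 3) := by simp at h2; omega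
          simp [h3, h5]
      · right; simp at h1 ⊢; omega
    rw [pvSegSearch, pvSegClean]
    by_cases hap : c = '\''
    · simp [hap]
    · rw [if_neg hap, if_neg hap, ← pvCond_global pre t' c]
      rcases h4 with h4 | h4
      · rw [h4]
        generalize (decide ((pre.length : Int) + 3 ≤ (((pre ++ c :: t').length : Int)))) = b1
        generalize (((pre.length : Int) == 0) || !(PySem.Chars.isalnum (PySem.List.pyGetD (pre ++ c :: t') ((pre.length : Int) - 1) ' '))) = b2
        generalize (PySem.Chars.upper (PySem.List.slice (pre ++ c :: t') (some (pre.length : Int)) (some ((pre.length : Int) + 3))) == ['R', 'E', 'M']) = b3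
        generalize (decide (((pre ++ c :: t').length : Int) ≤ (pre.length : Int) + 3) || !(PySem.Chars.isalnum (PySem.List.pyGetD (pre ++ c :: t') ((pre.length : Int) + 3) ' '))) = b4
        cases b1 <;> cases b2 <;> cases b3 <;> cases b4 <;>
          simp [ihc', Int.add_assoc]
      · rw [h4]
        simp [ihc', Int.add_assoc]

-- the REM test never sees past a quote: a hit's three characters and its end boundary lie in w
lemma pvRemHit_append_quote (pa : Bool) (w v : List Char) :
    pvRemHit pa (w ++ '"' :: v) = pvRemHit pa w := by
  have hd : ∀ (n : ℕ), decide (n + 1 + 1 + 1 < 3) = false := fun n => by simp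
  have hu : PySem.Chars.upperChar '"' = '"' := by decide
  have hquote : PySem.Chars.isalnum '"' = false := by decide
  match w with
  | [] => simp [pvRemHit, PySem.Chars.upper, hu]
  | [c0] => simp [pvRemHit, PySem.Chars.upper, hu]
  | [c0, c1] => simp [pvRemHit, PySem.Chars.upper, hu]
  | [c0, c1, c2] => simp [pvRemHit, PySem.Chars.upper, hquote]
  | c0 :: c1 :: c2 :: c3 :: w' => simp [pvRemHit, PySem.Chars.upper, List.getD, hd]

-- core: A's clean scan equals the clean segment walk over the split of the line on '"'
lemma pvMain (cs : List Char) : ∀ (n : Int) (pa inStr : Bool),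
    pvAClean cs n pa inStr = pvW inStr pa (cs.splitOn '"') n := by
  induction cs with
  | nil => intro n pa inStr; cases inStr <;> simp [pvAClean, List.splitOn_nil, pvW, pvSegClean]
  | cons c cs' ih =>
    intro n pa inStr
    have hsplit : (c :: cs').splitOn '"' =
        if c = '"' then [] :: cs'.splitOn '"' else (cs'.splitOn '"').modifyHead (List.cons c) := by
      simp [List.splitOn, List.splitOnP_cons]
    by_cases hq : c = '"'
    · subst hq
      rw [pvAClean, if_pos rfl, hsplit, if_pos rfl]
      cases inStr with
      | false =>
        rw [pvW]
        show _ = match pvSegClean [] n pa with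
          | some i => some i
          | none => pvW true false (cs'.splitOn '"') (n + (([] : List Char).length : Int) + 1)
        rw [pvSegClean]
        show pvAClean cs' (n + 1) false true = pvW true false (cs'.splitOn '"') (n + (([] : List Char).length : Int) + 1)
        rw [ih (n + 1) false true]
        norm_num
      | true =>
        rw [pvW]
        simp only [Bool.not_true]
        rw [ih (n + 1) false false]
        norm_num
    · obtain ⟨p0, rest, hrest⟩ : ∃ p0 rest, cs'.splitOn '"' = p0 :: rest := by
        cases h : cs'.splitOn '"' with
        | nil => exact absurd h (by rw [List.splitOn]; exact List.splitOnP_ne_nil _ _)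
        | cons a b => exact ⟨a, b, rfl⟩
      have hdecomp : (rest = [] ∧ cs' = p0) ∨ (∃ v, cs' = p0 ++ '"' :: v) := by
        have hi := List.intercalate_splitOn cs' '"'
        rw [hrest] at hi
        cases rest with
        | nil => left; constructor; rfl; rw [← hi]; simp [List.intercalate]
        | cons q qs =>
          right
          refine ⟨['"'].intercalate (q :: qs), ?_⟩
          rw [← hi]
          simp [List.intercalate, List.intersperse]
      have hrem : pvRemHit pa (c :: cs') = pvRemHit pa (c :: p0) := by
        rcases hdecomp with ⟨-, rfl⟩ | ⟨v, rfl⟩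
        · rfl
        · exact pvRemHit_append_quote pa (c :: p0) v
      rw [hsplit, if_neg hq, hrest, List.modifyHead]
      cases inStr with
      | true =>
        rw [pvAClean, if_neg hq, if_pos rfl, pvW, ih (n + 1) (PySem.Chars.isalnum c) true, hrest, pvW]
        congr 1
        push_cast [List.length_cons]
        ring
      | false =>
        by_cases hap : c = '\''
        · subst hap
          rw [pvAClean, pvW, pvSegClean]
          simp
        · rw [pvAClean, if_neg hq, pvW, pvSegClean, if_neg hap, if_neg hap]
          simp only [Bool.false_eq_true, if_false, hrem]
          by_cases hr : pvRemHit pa (c :: p0) = true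
          · rw [if_pos hr, if_pos hr]
          · rw [if_neg hr, if_neg hr]
            rw [ih (n + 1) (PySem.Chars.isalnum c) false, hrest, pvW]
            have harith : n + ((c :: p0).length : Int) + 1 = n + 1 + (p0.length : Int) + 1 := by
              push_cast [List.length_cons]; ring
            rw [harith]

-- B's walk over the parts equals the clean walk, the parity of k deciding in/out of string
lemma pvBWalk_bridge (parts : List (List Char)) : ∀ (k off : Int),
    pvBWalk parts k off = pvW (!(PySem.Int.mod k 2 == 0)) false parts off := by
  induction parts with
  | nil => intro k off; cases h : !(PySem.Int.mod k 2 == 0) <;> simp [pvBWalk, pvW]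
  | cons p rest ih =>
    intro k off
    have hmod : PySem.Int.mod k 2 = k % 2 := PySem.Int.mod_eq_emod_of_pos (by omega)
    have hmod1 : PySem.Int.mod (k + 1) 2 = (k + 1) % 2 := PySem.Int.mod_eq_emod_of_pos (by omega)
    have hsb := pvSeg_bridge p [] off
    simp only [List.nil_append, List.length_nil, Nat.cast_zero, Int.add_zero] at hsb
    have hla : pvLastAl [] = false := rfl
    rw [hla] at hsb
    by_cases he : PySem.Int.mod k 2 = 0
    · have hk : k % 2 = 0 := by rw [← hmod]; exact he
      have hk1 : (k + 1) % 2 = 1 := by omega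
      have hb : (!(PySem.Int.mod k 2 == 0)) = false := by rw [he]; decide
      have hb2 : (!(PySem.Int.mod (k + 1) 2 == 0)) = true := by rw [hmod1, hk1]; decide
      rw [pvBWalk, if_pos he, hb, pvW]
      rw [ih (k + 1) (off + (p.length : Int) + 1), hb2]
      cases hss : pvSegSearch p (PySem.List.enumerate p 0) <;> rw [hss] at hsb <;> simp [← hsb]
    · have hk : k % 2 = 1 := by rw [← hmod]; rw [hmod] at he; omega
      have hk1 : (k + 1) % 2 = 0 := by omega
      have he2 : PySem.Int.mod (k + 1) 2 = 0 := by rw [hmod1, hk1]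
      have hb : (!(PySem.Int.mod k 2 == 0)) = true := by rw [hmod, hk]; decide
      have hb2 : (!(PySem.Int.mod (k + 1) 2 == 0)) = false := by rw [he2]; decide
      rw [pvBWalk, if_neg he, hb, pvW, ih (k + 1) (off + (p.length : Int) + 1), hb2]

-- ===== VERDICT (by name: the statement is the Claim_ definition above) =====
theorem find_comment_start_py_spec : Claim_equal_find_comment_start_py := by
  intro line _
  show find_comment_start_py line = find_comment_start_py_alt line
  rw [find_comment_start_py, find_comment_start_py_alt]
  have hA := pvALoop_bridge line.toList [] false
  simp only [List.nil_append, List.length_nil, Nat.cast_zero] at hA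
  have hla : pvLastAl [] = false := rfl
  rw [hla] at hA
  rw [hA, pvMain, pvBWalk_bridge]
  have h0 : (!(PySem.Int.mod (0 : Int) 2 == 0)) = false := by decide
  rw [h0]
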